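-- pv_equiv track=rewrite | github.com/olsch88/aoc_2022 | d1.py | accululate_calories
-- ===== SOURCE A (Python) =====
-- from typing import List
--
-- def accululate_calories(data: List[int]) -> List[int]:
--     cur_cal = 0
--     list_of_calories = []
--     for cal in data:
--         if cal == 0:
--             list_of_calories.append(cur_cal)
--
--             cur_cal = 0
--         else:
--             cur_cal += cal
--
--     list_of_calories.sort()
--
--     list_of_calories.reverse()
--
--     return list_of_calories
-- ===== SOURCE B (Python) =====
-- from typing import List
--
-- def accululate_calories(data: List[int]) -> List[int]:
--     zeros = [i for i, cal in enumerate(data) if cal == 0]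
--     sums = []
--     prev = 0
--     for i in zeros:
--         sums.append(sum(data[prev:i]))
--         prev = i + 1
--     return sorted(sums, reverse=True)
-- ===== Notes on version B (the rewrite author's own statement) =====
-- stated objective: alternative
-- what changed: B replaces A's single stateful accumulator loop by an index-based decomposition: it first collects the positions of the zero separators, then sums the slice between consecutive separators, and sorts descending directly instead of ascending-sort-then-reverse.
import Mathlib
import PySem

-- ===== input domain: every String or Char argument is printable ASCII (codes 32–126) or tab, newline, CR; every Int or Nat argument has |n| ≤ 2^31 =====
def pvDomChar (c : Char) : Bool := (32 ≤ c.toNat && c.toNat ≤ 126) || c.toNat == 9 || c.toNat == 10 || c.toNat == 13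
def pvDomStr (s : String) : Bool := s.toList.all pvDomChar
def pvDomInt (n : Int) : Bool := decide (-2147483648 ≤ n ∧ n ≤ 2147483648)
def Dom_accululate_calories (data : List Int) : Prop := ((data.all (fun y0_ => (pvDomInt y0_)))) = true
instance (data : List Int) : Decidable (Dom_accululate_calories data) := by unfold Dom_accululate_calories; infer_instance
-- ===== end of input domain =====

-- ===== PORT A =====
-- B differs from A: zero-index decomposition + slice sums + direct descending sort (objective: alternative).
def accululate_calories (data : List Int) : List Int :=
  let st := data.foldl
    (fun (acc : Int × List Int) cal =>
      if cal == 0 then ((0 : Int), acc.2 ++ [acc.1]) else (acc.1 + cal, acc.2))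
    ((0 : Int), ([] : List Int))
  (PySem.List.sorted st.2 id false).reverse

-- ===== PORT B =====
def accululate_calories_alt (data : List Int) : List Int :=
  let zeros := (PySem.List.enumerate data 0).filterMap
    (fun p => if p.2 == 0 then some p.1 else none)
  let st := zeros.foldl
    (fun (acc : Int × List Int) i =>
      (i + 1, acc.2 ++ [(PySem.List.slice data (some acc.1) (some i)).sum]))
    ((0 : Int), ([] : List Int))
  PySem.List.sorted st.2 id true

-- ===== PRECONDITION & SPEC =====
def Spec_accululate_calories (data : List Int) (out : List Int) : Prop := out = accululate_calories_alt data
instance (data : List Int) (out : List Int) : Decidable (Spec_accululate_calories data out) := by unfold Spec_accululate_calories; infer_instance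

-- ===== CLAIM (what is proved, stated in full; the proofs are below) =====
def Claim_equal_accululate_calories : Prop := ∀ (data : List Int), Dom_accululate_calories data → Spec_accululate_calories data (accululate_calories data)

-- ===== LEMMAS AND PROOFS =====

/-- The list of group sums both loops build before sorting. -/
def pvGroups : Int → List Int → List Int
  | _, [] => []
  | c, x :: xs => if x = 0 then c :: pvGroups 0 xs else pvGroups (c + x) xs

lemma pv_A_fold (data : List Int) : ∀ (c : Int) (out : List Int),
    (data.foldl
      (fun (acc : Int × List Int) cal =>
        if cal == 0 then ((0 : Int), acc.2 ++ [acc.1]) else (acc.1 + cal, acc.2))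
      (c, out)).2 = out ++ pvGroups c data := by
  induction data with
  | nil => intro c out; simp [pvGroups]
  | cons x xs ih =>
    intro c out
    rw [List.foldl_cons]
    by_cases h : x = 0
    · rw [if_pos (by simp [h]), ih]
      simp [pvGroups, h]
    · rw [if_neg (by simp [h]), ih]
      simp [pvGroups, h]

lemma pv_fm_zero (s : Int) (l : List (Int × Int)) :
    ((s, (0 : Int)) :: l).filterMap (fun q => if q.2 == 0 then some q.1 else none)
      = s :: l.filterMap (fun q => if q.2 == 0 then some q.1 else none) := by simp

lemma pv_fm_nonzero (s x : Int) (l : List (Int × Int)) (h : x ≠ 0) :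
    ((s, x) :: l).filterMap (fun q => if q.2 == 0 then some q.1 else none)
      = l.filterMap (fun q => if q.2 == 0 then some q.1 else none) := by simp [h]

lemma pv_B_fold (rest : List Int) : ∀ (pre : List Int) (p : Nat) (out : List Int),
    p ≤ pre.length →
    (((PySem.List.enumerate rest (pre.length : Int)).filterMap
        (fun q => if q.2 == 0 then some q.1 else none)).foldl
      (fun (acc : Int × List Int) i =>
        (i + 1, acc.2 ++ [(PySem.List.slice (pre ++ rest) (some acc.1) (some i)).sum]))
      ((p : Int), out)).2
    = out ++ pvGroups
        ((PySem.List.slice (pre ++ rest) (some (p : Int)) (some (pre.length : Int))).sum) rest := by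
  induction rest with
  | nil => intro pre p out hp; simp [PySem.List.enumerate_nil, pvGroups]
  | cons x xs ih =>
    intro pre p out hp
    rw [PySem.List.enumerate_cons]
    have hfull : pre ++ x :: xs = (pre ++ [x]) ++ xs := by simp
    have hlen : ((pre ++ [x]).length : Int) = (pre.length : Int) + 1 := by simp
    by_cases h : x = 0
    · -- separator: emit the current slice sum, restart just past it
      subst h
      rw [pv_fm_zero, List.foldl_cons]
      have step := ih (pre ++ [(0 : Int)]) (pre ++ [(0 : Int)]).length
        (out ++ [(PySem.List.slice (pre ++ 0 :: xs) (some (p : Int)) (some (pre.length : Int))).sum])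
        (le_refl _)
      rw [← hfull] at step
      rw [show ((pre.length : Int) + 1) = (((pre ++ [(0 : Int)]).length : Nat) : Int) by simp] at *
      rw [step]
      have hempty : (PySem.List.slice (pre ++ 0 :: xs)
          (some (((pre ++ [(0 : Int)]).length : Nat) : Int))
          (some (((pre ++ [(0 : Int)]).length : Nat) : Int))).sum = 0 := by
        rw [hfull, PySem.List.slice_natCast]; simp
      rw [hempty]
      simp [pvGroups]
    · -- non-separator: it joins the running slice
      rw [pv_fm_nonzero _ _ _ h]
      have hsl : (PySem.List.slice (pre ++ x :: xs) (some (p : Int)) (some (((pre ++ [x]).length : Nat) : Int))).sum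
          = (PySem.List.slice (pre ++ x :: xs) (some (p : Int)) (some (pre.length : Int))).sum + x := by
        rw [PySem.List.slice_natCast, PySem.List.slice_natCast]
        have hlen1 : (pre ++ [x]).length = pre.length + 1 := by simp
        rw [hlen1]
        have htk : ((pre ++ x :: xs).drop p).take (pre.length + 1 - p)
            = ((pre ++ x :: xs).drop p).take (pre.length - p) ++ [x] := by
          have h1 : pre.length + 1 - p = (pre.length - p) + 1 := by omega
          rw [h1, List.take_add_one]
          congr 1
          have hidx : ((pre ++ x :: xs).drop p)[pre.length - p]? = some x := by
            rw [List.getElem?_drop]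
            have h2 : p + (pre.length - p) = pre.length := by omega
            rw [h2, List.getElem?_append_right (le_refl _)]
            simp
          simp [hidx]
        rw [htk]; simp
      have step := ih (pre ++ [x]) p out (by simp; omega)
      rw [← hfull] at step
      rw [show ((pre.length : Int) + 1) = (((pre ++ [x]).length : Nat) : Int) by simp]
      rw [step, hsl]
      simp [pvGroups, h]

lemma pv_sorted_desc (L : List Int) :
    (PySem.List.sorted L id false).reverse = PySem.List.sorted L id true := by
  haveI : Std.Antisymm (fun a b : Int => b ≤ a) := ⟨fun _ _ h1 h2 => le_antisymm h2 h1⟩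
  refine List.Perm.eq_of_pairwise' (r := fun a b : Int => b ≤ a) ?_ ?_ ?_
  · exact List.pairwise_reverse.mpr (by
      have := PySem.List.sorted_pairwise (xs := L) (key := id)
      simpa using this)
  · have := PySem.List.sorted_pairwise_rev (xs := L) (key := id)
    simpa using this
  · exact ((PySem.List.sorted L id false).reverse_perm.trans
      (PySem.List.sorted_perm L id false)).trans
      (PySem.List.sorted_perm L id true).symm

-- ===== VERDICT (by name: the statement is the Claim_ definition above) =====
theorem accululate_calories_spec : Claim_equal_accululate_calories := by
  intro data _
  unfold Spec_accululate_calories accululate_calories accululate_calories_alt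
  simp only []
  have hA := pv_A_fold data 0 []
  have hB := pv_B_fold data [] 0 [] (by simp)
  simp only [List.nil_append, List.length_nil, Nat.cast_zero] at hA hB
  rw [hA, hB]
  have h0 : (PySem.List.slice data (some 0) (some 0)).sum = 0 := by
    rw [show ((0:Int)) = ((0:Nat):Int) by simp, PySem.List.slice_natCast]; simp
  rw [h0]
  exact pv_sorted_desc _
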